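-- pv_equiv track=rewrite | github.com/lukaszkry/Codewars | Code Wars/Kata 6/Penguin Olympics Swimming Race Disaster.py | calculate_winners
-- ===== SOURCE A (Python) =====
-- def calculate_winners(snapshot, penguins):
--
--     # total distance
--     total_distance_left = []
--     for i in snapshot.split():
--         n = -1
--         for step in list(i):
--             n = n + 1
--             if (step == 'p') or (step == 'P'):
--                 new_list = list(i)[n+1:]
--                 distance = 0
--                 for element in new_list:
--                     if element == '-':
--                         distance += 1
--                     elif element == '~':
--                         distance += 2
--                     else:
--                         total_distance_left.append(distance)
--
--     # defining best three penguins
--     count = 0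
--     winner_list = []
--     while count < 3:
--         index_min = min(range(len(total_distance_left)), key=total_distance_left.__getitem__)
--         winner_list.append(penguins[index_min])
--         del total_distance_left[index_min]
--         del penguins[index_min]
--         count = count+1
--     return f'GOLD: {winner_list[0]}, SILVER: {winner_list[1]}, BRONZE: {winner_list[2]}'
-- ===== SOURCE B (Python) =====
-- def _lane_distances(lane):
--     out = []
--     for n, ch in enumerate(lane):
--         if ch in ('p', 'P'):
--             d = 0
--             for c in lane[n + 1:]:
--                 if c == '-':
--                     d += 1
--                 elif c == '~':
--                     d += 2
--                 else:
--                     out.append(d)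
--     return out
--
--
-- def calculate_winners(snapshot, penguins):
--     dists = []
--     for lane in snapshot.split():
--         dists += _lane_distances(lane)
--     order = sorted(range(len(dists)), key=lambda k: (dists[k], k))[:3]
--     winners = [penguins[k] for k in order]
--     for k in sorted(order, reverse=True):
--         del penguins[k]
--     return 'GOLD: {}, SILVER: {}, BRONZE: {}'.format(winners[0], winners[1], winners[2])
-- ===== Notes on version B (the rewrite author's own statement) =====
-- stated objective: alternative
-- what changed: Replaces the three destructive rounds of argmin-plus-deletion over the parsed distance list by one stable index sort on the key (distance, index) whose first three entries give the winners directly, and factors the lane parsing into a per-lane helper that returns each lane's distance list.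
import Mathlib
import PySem

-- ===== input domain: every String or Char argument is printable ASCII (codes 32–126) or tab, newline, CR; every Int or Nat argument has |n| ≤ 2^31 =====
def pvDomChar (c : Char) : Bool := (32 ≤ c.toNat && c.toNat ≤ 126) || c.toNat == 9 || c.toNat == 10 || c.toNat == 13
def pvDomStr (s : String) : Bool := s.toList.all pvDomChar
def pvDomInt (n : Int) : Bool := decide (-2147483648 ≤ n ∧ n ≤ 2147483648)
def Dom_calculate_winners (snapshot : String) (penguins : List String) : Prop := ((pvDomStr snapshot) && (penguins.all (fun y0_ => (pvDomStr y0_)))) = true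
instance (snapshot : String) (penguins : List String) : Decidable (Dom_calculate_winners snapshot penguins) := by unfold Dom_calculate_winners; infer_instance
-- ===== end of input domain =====

-- B replaces A's three destructive argmin+delete selection rounds by one stable index sort on the
-- key (distance, original index) and reads the three winners off its prefix (objective: alternative).
-- Both Pythons delete the three winners from the mutable `penguins` argument; the theorems below are
-- about the RETURN value only.

-- ===== PORT A =====
-- inner loop 'for element in new_list', state = (distance, total_distance_left)
def pvInnerA (q : Int × List Int) (element : Char) : Int × List Int :=
  if element = '-' then (q.1 + 1, q.2)
  else if element = '~' then (q.1 + 2, q.2)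
  else (q.1, q.2 ++ [q.1])

-- body of 'for step in list(i)', state = (n, total_distance_left)
def pvStepA (cs : List Char) (st : Int × List Int) (step : Char) : Int × List Int :=
  let n := st.1 + 1
  if step = 'p' ∨ step = 'P' then
    (n, ((PySem.List.slice cs (some (n + 1)) none).foldl pvInnerA (0, st.2)).2)
  else (n, st.2)

def pvParseA (snapshot : String) : List Int :=
  (PySem.Str.split₀ snapshot).foldl (fun tdl i => ((i.toList).foldl (pvStepA i.toList) (-1, tdl)).2) []

-- 'while count < 3' loop, fuel = 3 - count; penguins[index_min] is in range under Pre_ (pyGetD default)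
def pvWhileA (fuel : Nat) (tdl : List Int) (pens : List String) (winners : List String) : List String :=
  match fuel with
  | 0 => winners
  | f + 1 =>
    let im := PySem.List.minD (PySem.List.pyRange 0 (tdl.length : Int) 1) (fun k => PySem.List.pyGetD tdl k 0) 0
    pvWhileA f (((PySem.List.pop? tdl im).map Prod.snd).getD tdl)
               (((PySem.List.pop? pens im).map Prod.snd).getD pens)
               (winners ++ [PySem.List.pyGetD pens im ""])

def calculate_winners (snapshot : String) (penguins : List String) : String :=
  let tdl := pvParseA snapshot
  let wl := pvWhileA 3 tdl penguins []
  "GOLD: " ++ PySem.List.pyGetD wl 0 "" ++ ", SILVER: " ++ PySem.List.pyGetD wl 1 "" ++ ", BRONZE: " ++ PySem.List.pyGetD wl 2 ""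

-- ===== PORT B =====
-- inner loop of _lane_distances, state = (d, out)
def pvInnerB (q : Int × List Int) (c : Char) : Int × List Int :=
  if c = '-' then (q.1 + 1, q.2)
  else if c = '~' then (q.1 + 2, q.2)
  else (q.1, q.2 ++ [q.1])

def pvLaneB (lane : List Char) : List Int :=
  (PySem.List.enumerate lane 0).foldl (fun out nc =>
    if nc.2 = 'p' ∨ nc.2 = 'P' then
      ((PySem.List.slice lane (some (nc.1 + 1)) none).foldl pvInnerB (0, out)).2
    else out) []

def calculate_winners_alt (snapshot : String) (penguins : List String) : String :=
  let dists := (PySem.Str.split₀ snapshot).foldl (fun ds lane => ds ++ pvLaneB lane.toList) []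
  let order := PySem.List.slice
      (PySem.List.sorted2 (PySem.List.pyRange 0 (dists.length : Int) 1)
        (fun k => PySem.List.pyGetD dists k 0) (fun k => k) false)
      none (some 3)
  let winners := order.map (fun k => PySem.List.pyGetD penguins k "")
  "GOLD: " ++ PySem.List.pyGetD winners 0 "" ++ ", SILVER: " ++ PySem.List.pyGetD winners 1 "" ++ ", BRONZE: " ++ PySem.List.pyGetD winners 2 ""


-- ===== PRECONDITION & SPEC =====
-- spec-level description of the parsed distance list: for every 'p'/'P' in a lane, one entry per later
-- character that is neither '-' nor '~', holding the '-'(1)/'~'(2)-weighted length of the suffix before it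
def pvW (c : Char) : Int := if c = '-' then 1 else if c = '~' then 2 else 0

def pvSufSpec (suf : List Char) : List Int :=
  ((List.range suf.length).filter (fun j => !(suf[j]! = '-' || suf[j]! = '~'))).map
    (fun j => ((suf.take j).map pvW).sum)

def pvDists (snapshot : String) : List Int :=
  (PySem.Str.split₀ snapshot).flatMap (fun w =>
    (List.range w.toList.length).flatMap (fun n =>
      if w.toList[n]! = 'p' ∨ w.toList[n]! = 'P' then pvSufSpec (w.toList.drop (n + 1)) else []))

-- position of the first minimum of a list (0 for [])
def pvArgmin (ds : List Int) : Int :=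
  PySem.List.minD (PySem.List.pyRange 0 (ds.length : Int) 1) (fun k => PySem.List.pyGetD ds k 0) 0

-- Pre_ holds exactly when A returns: at least 3 parsed distances (else min() raises ValueError), and in
-- each of the three rounds the position of the first minimum falls inside the shrinking penguin list
-- (else penguins[index_min] raises IndexError).
def Pre_calculate_winners (snapshot : String) (penguins : List String) : Prop :=
  3 ≤ (pvDists snapshot).length ∧
  (let d0 := pvDists snapshot
   let i1 := (pvArgmin d0).toNat
   let d1 := d0.eraseIdx i1
   let i2 := (pvArgmin d1).toNat
   let d2 := d1.eraseIdx i2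
   let i3 := (pvArgmin d2).toNat
   i1 < penguins.length ∧ i2 + 1 < penguins.length ∧ i3 + 2 < penguins.length)
instance (snapshot : String) (penguins : List String) : Decidable (Pre_calculate_winners snapshot penguins) := by unfold Pre_calculate_winners; infer_instance

def pvWitness_calculate_winners : String × List String := ("p-X p~X pX", ["a", "b", "c"])

def Spec_calculate_winners (snapshot : String) (penguins : List String) (out : String) : Prop := out = calculate_winners_alt snapshot penguins
instance (snapshot : String) (penguins : List String) (out : String) : Decidable (Spec_calculate_winners snapshot penguins out) := by unfold Spec_calculate_winners; infer_instance

-- ===== CLAIM (what is proved, stated in full; the proofs are below) =====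
def Claim_equal_calculate_winners : Prop := ∀ (snapshot : String) (penguins : List String), Dom_calculate_winners snapshot penguins → Pre_calculate_winners snapshot penguins → Spec_calculate_winners snapshot penguins (calculate_winners snapshot penguins)


-- ===== LEMMAS AND PROOFS =====
-- L1: min? returns the FIRST extremal element
theorem pv_min?_first {α κ : Type} [LinearOrder κ] (xs : List α) (key : α → κ) (m : α)
    (h : PySem.List.min? xs key = some m) :
    ∃ l1 l2, xs = l1 ++ m :: l2 ∧ ∀ y ∈ l1, key m < key y := by
  induction xs using List.reverseRecOn with
  | nil => simp [PySem.List.min?] at h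
  | append_singleton xs x ih =>
    rw [show PySem.List.min? (xs ++ [x]) key
        = (match PySem.List.min? xs key with
           | none => some x
           | some m0 => if key x < key m0 then some x else some m0) from by
      simp only [PySem.List.min?, List.foldl_append, List.foldl_cons, List.foldl_nil]
      rfl] at h
    cases hmin : PySem.List.min? xs key with
    | none =>
      simp [hmin] at h
      subst h
      have : xs = [] := (PySem.List.min?_eq_none_iff xs key).mp hmin
      subst this
      exact ⟨[], [], rfl, by simp⟩
    | some m0 =>
      simp only [hmin] at h
      by_cases hlt : key x < key m0
      · simp [hlt] at h
        subst h
        refine ⟨xs, [], rfl, ?_⟩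
        intro y hy
        exact lt_of_lt_of_le hlt (PySem.List.min?_isMin hmin y hy)
      · simp [hlt] at h
        subst h
        obtain ⟨l1, l2, hsplit, hall⟩ := ih hmin
        exact ⟨l1, l2 ++ [x], by simp [hsplit], hall⟩

-- proof-only abbreviations
def pvShift (i j : Int) : Int := if j < i then j else j + 1
def pvKey (ds : List Int) (k : Int) : Lex (Int × Int) := toLex (PySem.List.pyGetD ds k 0, k)
def pvSS (ds : List Int) : List Int :=
  PySem.List.sorted (PySem.List.pyRange 0 (ds.length : Int) 1) (pvKey ds) false

theorem pv_argmin_props (ds : List Int) (hne : ds ≠ []) :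
    (0 ≤ pvArgmin ds ∧ pvArgmin ds < (ds.length : Int)) ∧
    (∀ j : Int, 0 ≤ j → j < (ds.length : Int) →
      PySem.List.pyGetD ds (pvArgmin ds) 0 ≤ PySem.List.pyGetD ds j 0) ∧
    (∀ j : Int, 0 ≤ j → j < pvArgmin ds →
      PySem.List.pyGetD ds (pvArgmin ds) 0 < PySem.List.pyGetD ds j 0) := by
  have hR : PySem.List.pyRange 0 (ds.length : Int) 1 ≠ [] := by
    have : (PySem.List.pyRange 0 (ds.length : Int) 1).length = ((ds.length : Int) - 0).toNat :=
      PySem.List.length_pyRange_one 0 (ds.length : Int)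
    intro hnil
    rw [hnil] at this
    simp at this
    exact hne (List.eq_nil_of_length_eq_zero this.symm)
  have hmin : PySem.List.min? (PySem.List.pyRange 0 (ds.length : Int) 1)
      (fun k => PySem.List.pyGetD ds k 0) = some (pvArgmin ds) :=
    PySem.List.min?_eq_some_minD _ _ 0 hR
  have hmem := PySem.List.min?_mem hmin
  have hrange := (PySem.List.mem_pyRange_one).mp hmem
  refine ⟨hrange, ?_, ?_⟩
  · intro j hj0 hjn
    exact PySem.List.min?_isMin hmin j ((PySem.List.mem_pyRange_one).mpr ⟨hj0, hjn⟩)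
  · intro j hj0 hji
    obtain ⟨l1, l2, hsplit, hall⟩ := pv_min?_first _ _ _ hmin
    have hjmem : j ∈ PySem.List.pyRange 0 (ds.length : Int) 1 :=
      (PySem.List.mem_pyRange_one).mpr ⟨hj0, lt_trans hji hrange.2⟩
    rw [hsplit] at hjmem
    rcases List.mem_append.mp hjmem with hj1 | hj2
    · exact hall j hj1
    · exfalso
      have hpw := PySem.List.pairwise_lt_pyRange_one 0 (ds.length : Int)
      rw [hsplit] at hpw
      rcases List.mem_cons.mp hj2 with rfl | hj2
      · omega
      · have h2 := (List.pairwise_cons.mp (List.pairwise_append.mp hpw).2.1).1 j hj2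
        omega

-- L3: sorted2 with keys (k1, k2) is sorted with the lexicographic key
theorem pv_sorted2_eq_sorted_lex (xs : List Int) (k1 k2 : Int → Int) :
    PySem.List.sorted2 xs k1 k2 false
      = PySem.List.sorted xs (fun a => toLex (k1 a, k2 a)) false := by
  have hfun : (fun (a b : Int) => decide (k1 a < k1 b) || (!decide (k1 b < k1 a) && decide (k2 a < k2 b)))
      = fun a b => decide (toLex (k1 a, k2 a) < toLex (k1 b, k2 b)) := by
    funext a b
    have hiff : (toLex (k1 a, k2 a) < toLex (k1 b, k2 b)) ↔
        (k1 a < k1 b ∨ (¬ k1 b < k1 a ∧ k2 a < k2 b)) := by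
      rw [Prod.Lex.lt_iff]
      simp only [ofLex_toLex]
      omega
    simp [hiff, ← decide_not]
  simp only [PySem.List.sorted2, PySem.List.sorted_eq_foldl_insertBy, Bool.false_eq_true, if_false, hfun]

-- L4: pvSS is strictly pairwise-increasing in pvKey
theorem pv_SS_pairwise (ds : List Int) :
    (pvSS ds).Pairwise (fun a b => pvKey ds a < pvKey ds b) := by
  have hle : (pvSS ds).Pairwise (fun a b => pvKey ds a ≤ pvKey ds b) :=
    PySem.List.sorted_pairwise _ _
  have hperm : (pvSS ds).Perm (PySem.List.pyRange 0 (ds.length : Int) 1) :=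
    PySem.List.sorted_perm _ _ _
  have hnd : (pvSS ds).Nodup := hperm.nodup_iff.mpr (PySem.List.nodup_pyRange_one 0 _)
  refine (hle.and hnd).imp ?_
  rintro a b ⟨h1, h2⟩
  refine lt_of_le_of_ne h1 ?_
  intro he
  exact h2 (by
    have := congrArg (fun x => (ofLex x).2) he
    simpa [pvKey] using this)

-- L5: indexing an eraseIdx list through pvShift
theorem pv_pyGetD_eraseIdx {α : Type} (xs : List α) (d : α) (i j : Int)
    (hi0 : 0 ≤ i) (hilt : i < (xs.length : Int))
    (hj0 : 0 ≤ j) (hjlt : j < (xs.length : Int) - 1) :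
    PySem.List.pyGetD (xs.eraseIdx i.toNat) j d = PySem.List.pyGetD xs (pvShift i j) d := by
  have hlen : (xs.eraseIdx i.toNat).length = xs.length - 1 := by
    rw [List.length_eraseIdx]; simp only [if_pos (by omega : i.toNat < xs.length)]
  rw [PySem.List.pyGetD_eq_getElem _ d hj0 (by rw [hlen]; omega)]
  unfold pvShift
  split_ifs with hcase
  · rw [PySem.List.pyGetD_eq_getElem _ d hj0 (by omega)]
    rw [List.getElem_eraseIdx]
    simp only [dif_pos (by omega : j.toNat < i.toNat)]
  · rw [PySem.List.pyGetD_eq_getElem _ d (by omega) (by omega)]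
    rw [List.getElem_eraseIdx]
    simp only [dif_neg (by omega : ¬ j.toNat < i.toNat)]
    congr 1
    omega

theorem pv_shift_mono (i a b : Int) (h : a < b) : pvShift i a < pvShift i b := by
  unfold pvShift; split_ifs <;> omega

-- L6: one selection round peels the head off the sorted index list
theorem pv_SS_cons (ds : List Int) (hne : ds ≠ []) :
    pvSS ds = pvArgmin ds ::
      (pvSS (ds.eraseIdx (pvArgmin ds).toNat)).map (pvShift (pvArgmin ds)) := by
  obtain ⟨⟨hi0, hin⟩, hmin, hfirst⟩ := pv_argmin_props ds hne
  set i := pvArgmin ds with hidef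
  set ds' := ds.eraseIdx i.toNat with hds'
  have hlen' : ds'.length = ds.length - 1 := by
    rw [hds', List.length_eraseIdx]; simp only [if_pos (by omega : i.toNat < ds.length)]
  have hlen'i : (ds'.length : Int) = (ds.length : Int) - 1 := by
    rw [hlen']; push_cast [Nat.cast_sub (by omega : 1 ≤ ds.length)]; ring
  have hval : ∀ j : Int, 0 ≤ j → j < (ds.length : Int) - 1 →
      PySem.List.pyGetD ds' j 0 = PySem.List.pyGetD ds (pvShift i j) 0 := by
    intro j hj0 hjlt
    exact pv_pyGetD_eraseIdx ds 0 i j hi0 hin hj0 hjlt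
  have hshift_mem : ∀ j : Int, 0 ≤ j → j < (ds.length : Int) - 1 →
      (0 ≤ pvShift i j ∧ pvShift i j < (ds.length : Int) ∧ pvShift i j ≠ i) := by
    intro j hj0 hjlt
    unfold pvShift; split_ifs <;> omega
  -- the map of the one-shorter range through pvShift
  have hmapR : (PySem.List.pyRange 0 ((ds.length : Int) - 1) 1).map (pvShift i)
      = PySem.List.pyRange 0 i 1 ++ PySem.List.pyRange (i + 1) (ds.length : Int) 1 := by
    rw [PySem.List.pyRange_one_append 0 i ((ds.length : Int) - 1) hi0 (by omega), List.map_append]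
    congr 1
    · have hid : (PySem.List.pyRange 0 i 1).map (pvShift i) = (PySem.List.pyRange 0 i 1).map id :=
        List.map_congr_left (fun a ha => by
          have := (PySem.List.mem_pyRange_one).mp ha
          unfold pvShift; rw [if_pos (by omega)]; rfl)
      rw [hid, List.map_id]
    · rw [PySem.List.pyRange_one i ((ds.length : Int) - 1),
          PySem.List.pyRange_one (i + 1) (ds.length : Int), List.map_map]
      rw [show ((ds.length : Int) - 1 - i).toNat = ((ds.length : Int) - (i + 1)).toNat from by omega]
      exact List.map_congr_left (fun k hk => by
        simp only [Function.comp_apply]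
        unfold pvShift
        rw [if_neg (by omega)]
        ring)
  have hmemSS' : ∀ j : Int, j ∈ pvSS ds' → 0 ≤ j ∧ j < (ds.length : Int) - 1 := by
    intro j hj
    rw [pvSS, PySem.List.mem_sorted, PySem.List.mem_pyRange_one] at hj
    omega
  show PySem.List.sorted (PySem.List.pyRange 0 (ds.length : Int) 1) (pvKey ds) false = _
  apply PySem.List.sorted_eq_of_perm_of_pairwise_lt
  · -- permutation
    have h1 : (pvSS ds').Perm (PySem.List.pyRange 0 ((ds.length : Int) - 1) 1) := by
      unfold pvSS
      rw [hlen'i]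
      exact PySem.List.sorted_perm _ _ _
    have h2 := (h1.map (pvShift i)).cons i
    rw [hmapR] at h2
    refine h2.trans ?_
    rw [PySem.List.pyRange_one_append 0 i (ds.length : Int) hi0 (by omega),
        PySem.List.pyRange_one_cons (by omega : i < (ds.length : Int))]
    exact List.perm_middle.symm
  · -- strict pairwise order
    refine List.pairwise_cons.mpr ⟨?_, ?_⟩
    · intro x hx
      obtain ⟨j, hj, rfl⟩ := List.mem_map.mp hx
      obtain ⟨hj0, hjlt⟩ := hmemSS' j hj
      obtain ⟨hs0, hslt, hsne⟩ := hshift_mem j hj0 hjlt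
      have hv := hmin (pvShift i j) hs0 hslt
      unfold pvKey
      rw [Prod.Lex.lt_iff]
      simp only [ofLex_toLex]
      by_cases hc : pvShift i j < i
      · have := hfirst (pvShift i j) hs0 hc
        omega
      · omega
    · refine (List.pairwise_map).mpr ((pv_SS_pairwise ds').imp_of_mem ?_)
      intro a b ha hb hab
      obtain ⟨ha0, halt⟩ := hmemSS' a ha
      obtain ⟨hb0, hblt⟩ := hmemSS' b hb
      unfold pvKey at hab ⊢
      rw [Prod.Lex.lt_iff] at hab ⊢
      simp only [ofLex_toLex] at hab ⊢
      rw [← hval a ha0 halt, ← hval b hb0 hblt]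
      rcases hab with h | ⟨h1, h2⟩
      · exact Or.inl h
      · exact Or.inr ⟨h1, pv_shift_mono i a b h2⟩


-- the list of distances contributed by the suffix after each 'p'/'P' of a word
def pvF (cs : List Char) : List (Int × Char) → List Int
  | [] => []
  | nc :: r =>
      (if nc.2 = 'p' ∨ nc.2 = 'P'
       then ((PySem.List.slice cs (some (nc.1 + 1)) none).foldl pvInnerA (0, [])).2
       else []) ++ pvF cs r

theorem pvInnerB_eq : pvInnerB = pvInnerA := rfl

-- the inner loop only appends: the accumulator factors out
theorem pv_inner_acc (cs : List Char) : ∀ (d : Int) (acc : List Int),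
    cs.foldl pvInnerA (d, acc)
      = ((cs.foldl pvInnerA (d, [])).1, acc ++ (cs.foldl pvInnerA (d, [])).2) := by
  induction cs with
  | nil => intro d acc; simp
  | cons c cs ih =>
    intro d acc
    simp only [List.foldl_cons, pvInnerA]
    split_ifs with h1 h2
    · exact ih (d + 1) acc
    · exact ih (d + 2) acc
    · rw [ih d (acc ++ [d]), ih d ([] ++ [d])]
      simp

-- A's per-word loop computes pvF
theorem pv_wordA_eq (cs : List Char) : ∀ (l : List Char) (t : Int) (acc : List Int),
    (l.foldl (pvStepA cs) (t, acc)).2 = acc ++ pvF cs (PySem.List.enumerate l (t + 1)) := by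
  intro l
  induction l with
  | nil => intro t acc; simp [PySem.List.enumerate, pvF]
  | cons c l ih =>
    intro t acc
    rw [PySem.List.enumerate_cons]
    simp only [List.foldl_cons, pvStepA, pvF]
    split_ifs with h
    · rw [ih (t + 1) _, pv_inner_acc]
      simp
    · rw [ih (t + 1) acc]
      simp

-- B's per-lane loop computes pvF as well
theorem pv_inner_accB (cs : List Char) : ∀ (d : Int) (acc : List Int),
    cs.foldl pvInnerB (d, acc)
      = ((cs.foldl pvInnerB (d, [])).1, acc ++ (cs.foldl pvInnerB (d, [])).2) := by
  simp only [pvInnerB_eq]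
  exact pv_inner_acc cs

theorem pv_laneB_eq (lane : List Char) : ∀ (e : List (Int × Char)) (acc : List Int),
    e.foldl (fun out nc =>
      if nc.2 = 'p' ∨ nc.2 = 'P' then
        ((PySem.List.slice lane (some (nc.1 + 1)) none).foldl pvInnerB (0, out)).2
      else out) acc = acc ++ pvF lane e := by
  intro e
  induction e with
  | nil => intro acc; simp [pvF]
  | cons nc e ih =>
    intro acc
    simp only [List.foldl_cons, pvF]
    split_ifs with h
    · rw [pv_inner_accB, ih]
      simp [pvInnerB_eq]
    · rw [ih]
      simp

theorem pv_laneB_F (lane : List Char) :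
    pvLaneB lane = pvF lane (PySem.List.enumerate lane 0) := by
  rw [pvLaneB, pv_laneB_eq]
  simp

-- L8: the two parses agree
theorem pv_parse_eq (snapshot : String) :
    pvParseA snapshot
      = (PySem.Str.split₀ snapshot).foldl (fun ds lane => ds ++ pvLaneB lane.toList) [] := by
  rw [pvParseA]
  generalize PySem.Str.split₀ snapshot = ws
  have main : ∀ (ws : List String) (acc : List Int),
      ws.foldl (fun tdl i => ((i.toList).foldl (pvStepA i.toList) (-1, tdl)).2) acc
        = ws.foldl (fun ds lane => ds ++ pvLaneB lane.toList) acc := by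
    intro ws
    induction ws with
    | nil => intro acc; rfl
    | cons w ws ih =>
      intro acc
      simp only [List.foldl_cons]
      rw [pv_wordA_eq, pv_laneB_F, show (-1 : Int) + 1 = 0 from by norm_num]
      exact ih _
  exact main ws []


theorem pv_sufSpec_cons (c : Char) (r : List Char) :
    pvSufSpec (c :: r)
      = (if !(c = '-' || c = '~') then [(0 : Int)] else [])
        ++ (pvSufSpec r).map (fun x => pvW c + x) := by
  unfold pvSufSpec
  rw [show (c :: r).length = r.length + 1 from rfl, List.range_succ_eq_map,
      List.filter_cons, List.filter_map, List.map_map]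
  have htail : List.map (fun j => (List.map pvW (List.take j (c :: r))).sum)
        (List.map Nat.succ
          (List.filter ((fun j => !(decide ((c :: r)[j]! = '-') || decide ((c :: r)[j]! = '~'))) ∘ Nat.succ)
            (List.range r.length)))
      = List.map ((fun x => pvW c + x) ∘ fun j => (List.map pvW (List.take j r)).sum)
          (List.filter (fun j => !(decide (r[j]! = '-') || decide (r[j]! = '~'))) (List.range r.length)) := by
    have hfilt : List.filter ((fun j => !(decide ((c :: r)[j]! = '-') || decide ((c :: r)[j]! = '~'))) ∘ Nat.succ)
          (List.range r.length)
        = List.filter (fun j => !(decide (r[j]! = '-') || decide (r[j]! = '~'))) (List.range r.length) :=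
      List.filter_congr (fun j hj => by simp only [Function.comp_apply, List.getElem!_cons_succ])
    rw [hfilt, List.map_map]
    apply List.map_congr_left
    intro j hj
    simp only [Function.comp_apply, List.take_succ_cons, List.map_cons, List.sum_cons]
  by_cases hc : (!(c = '-' || c = '~')) = true
  · rw [if_pos hc, if_pos (by simpa using hc), List.map_cons, htail]
    simp
  · rw [if_neg hc, if_neg (by simpa using hc), htail]
    simp

theorem pv_inner_spec (suf : List Char) : ∀ d : Int,
    (suf.foldl pvInnerA (d, [])).2 = (pvSufSpec suf).map (fun x => d + x) := by
  induction suf with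
  | nil => intro d; simp [pvSufSpec]
  | cons c r ih =>
    intro d
    rw [pv_sufSpec_cons]
    simp only [List.foldl_cons, pvInnerA]
    by_cases h1 : c = '-'
    · rw [if_pos h1, ih (d + 1), if_neg (by simp [h1]), List.nil_append, List.map_map]
      congr 1
      funext x
      simp only [Function.comp_apply, pvW, if_pos h1]
      ring
    · by_cases h2 : c = '~'
      · rw [if_neg h1, if_pos h2, ih (d + 2), if_neg (by simp [h2]), List.nil_append, List.map_map]
        congr 1
        funext x
        simp only [Function.comp_apply, pvW, if_neg h1, if_pos h2]
        ring
      · rw [if_neg h1, if_neg h2, pv_inner_acc r d ([] ++ [d]), ih d,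
            if_pos (by simp [h1, h2]), List.map_append, List.map_map]
        simp only [List.nil_append, List.map_cons, List.map_nil, List.singleton_append]
        congr 1
        · simp
        · congr 1
          funext x
          simp only [Function.comp_apply, pvW, if_neg h1, if_neg h2]
          ring

theorem pv_F_spec (cs : List Char) : ∀ (l : List Char) (t : Nat),
    pvF cs (PySem.List.enumerate l (t : Int))
      = (List.range l.length).flatMap (fun n =>
          if l[n]! = 'p' ∨ l[n]! = 'P' then pvSufSpec (cs.drop (t + n + 1)) else []) := by
  intro l
  induction l with
  | nil => intro t; simp [PySem.List.enumerate, pvF]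
  | cons c l ih =>
    intro t
    rw [PySem.List.enumerate_cons]
    simp only [pvF]
    have hslice : PySem.List.slice cs (some ((t : Int) + 1)) none = cs.drop (t + 1) := by
      rw [show ((t : Int) + 1) = ((t + 1 : Nat) : Int) from by push_cast; ring]
      exact PySem.List.slice_from_natCast cs (t + 1)
    rw [show PySem.List.enumerate l ((t : Int) + 1) = PySem.List.enumerate l (((t + 1 : Nat)) : Int) from by
          rw [show ((t : Int) + 1) = ((t + 1 : Nat) : Int) from by push_cast; ring],
        ih (t + 1),
        show (c :: l).length = l.length + 1 from rfl, List.range_succ_eq_map,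
        List.flatMap_cons, List.flatMap_map]
    congr 1
    · by_cases hp : c = 'p' ∨ c = 'P'
      · rw [if_pos hp, if_pos (by simpa using hp), hslice, pv_inner_spec]
        rw [show t + 0 + 1 = t + 1 from by omega]
        simp
      · rw [if_neg hp, if_neg (by simpa using hp)]
    · apply List.flatMap_congr
      intro n hn
      simp only [List.getElem!_cons_succ]
      rw [show t + (n + 1) + 1 = t + 1 + n + 1 from by omega]

theorem pv_dists_eq (snapshot : String) : pvParseA snapshot = pvDists snapshot := by
  rw [pv_parse_eq, pvDists]
  have hlane : ∀ w : String, pvLaneB w.toList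
      = (List.range w.toList.length).flatMap (fun n =>
          if w.toList[n]! = 'p' ∨ w.toList[n]! = 'P' then pvSufSpec (w.toList.drop (n + 1)) else []) := by
    intro w
    rw [pv_laneB_F,
        show PySem.List.enumerate w.toList 0 = PySem.List.enumerate w.toList ((0 : Nat) : Int) from by norm_num,
        pv_F_spec]
    apply List.flatMap_congr
    intro n hn
    rw [show 0 + n + 1 = n + 1 from by omega]
  have houter : ∀ (ws : List String) (acc : List Int),
      ws.foldl (fun ds lane => ds ++ pvLaneB lane.toList) acc
        = acc ++ ws.flatMap (fun w => pvLaneB w.toList) := by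
    intro ws
    induction ws with
    | nil => intro acc; simp
    | cons w ws ih =>
      intro acc
      simp only [List.foldl_cons, List.flatMap_cons]
      rw [ih]
      simp
  rw [houter _ []]
  simp only [List.nil_append]
  apply List.flatMap_congr
  intro w hw
  exact hlane w

theorem pv_round (f : Nat) (ds : List Int) (ps w : List String)
    (hds : ds ≠ []) (hps : (pvArgmin ds).toNat < ps.length) :
    pvWhileA (f + 1) ds ps w
      = pvWhileA f (ds.eraseIdx (pvArgmin ds).toNat) (ps.eraseIdx (pvArgmin ds).toNat)
          (w ++ [PySem.List.pyGetD ps (pvArgmin ds) ""]) := by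
  obtain ⟨⟨hi0, hin⟩, -, -⟩ := pv_argmin_props ds hds
  have hicast : ((pvArgmin ds).toNat : Int) = pvArgmin ds := Int.toNat_of_nonneg hi0
  have hids : (pvArgmin ds).toNat < ds.length := by omega
  have hpop1 : PySem.List.pop? ds (pvArgmin ds)
      = some (ds[(pvArgmin ds).toNat], ds.eraseIdx (pvArgmin ds).toNat) := by
    conv_lhs => rw [← hicast]
    exact PySem.List.pop?_natCast ds (pvArgmin ds).toNat hids
  have hpop2 : PySem.List.pop? ps (pvArgmin ds)
      = some (ps[(pvArgmin ds).toNat], ps.eraseIdx (pvArgmin ds).toNat) := by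
    conv_lhs => rw [← hicast]
    exact PySem.List.pop?_natCast ps (pvArgmin ds).toNat hps
  show pvWhileA f (((PySem.List.pop? ds _).map Prod.snd).getD ds)
        (((PySem.List.pop? ps _).map Prod.snd).getD ps) _ = _
  rw [show PySem.List.minD (PySem.List.pyRange 0 ((ds.length : Int)) 1)
        (fun k => PySem.List.pyGetD ds k 0) 0 = pvArgmin ds from rfl, hpop1, hpop2]
  rfl

-- ===== VERDICT (by name: the statement is the Claim_ definition above) =====
theorem calculate_winners_spec : Claim_equal_calculate_winners := by
  intro snapshot penguins hdom hpre
  obtain ⟨h3p, hb⟩ := hpre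
  rw [← pv_dists_eq snapshot] at h3p hb
  show calculate_winners snapshot penguins = calculate_winners_alt snapshot penguins
  obtain ⟨hb1, hb2, hb3⟩ := hb
  -- abbreviations
  have h3 : 3 ≤ (pvParseA snapshot).length := h3p
  have hne : pvParseA snapshot ≠ [] := by
    intro h; rw [h] at h3; simp at h3
  obtain ⟨⟨hi10, hi1n⟩, -, -⟩ := pv_argmin_props _ hne
  have hc1 : ((pvArgmin (pvParseA snapshot)).toNat : Int) = pvArgmin (pvParseA snapshot) :=
    Int.toNat_of_nonneg hi10
  have hlen1 : ((pvParseA snapshot).eraseIdx (pvArgmin (pvParseA snapshot)).toNat).length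
      = (pvParseA snapshot).length - 1 := by
    rw [List.length_eraseIdx, if_pos (by omega)]
  have hne1 : (pvParseA snapshot).eraseIdx (pvArgmin (pvParseA snapshot)).toNat ≠ [] := by
    intro h
    have := congrArg List.length h
    rw [hlen1] at this
    simp at this
    omega
  obtain ⟨⟨hi20, hi2n⟩, -, -⟩ := pv_argmin_props _ hne1
  have hc2 : ((pvArgmin ((pvParseA snapshot).eraseIdx (pvArgmin (pvParseA snapshot)).toNat)).toNat : Int)
      = pvArgmin ((pvParseA snapshot).eraseIdx (pvArgmin (pvParseA snapshot)).toNat) :=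
    Int.toNat_of_nonneg hi20
  set ds := pvParseA snapshot with hdsdef
  set i1 := pvArgmin ds with hi1def
  set ds1 := ds.eraseIdx i1.toNat with hds1def
  set i2 := pvArgmin ds1 with hi2def
  set ds2 := ds1.eraseIdx i2.toNat with hds2def
  have hlen2 : ds2.length = ds.length - 2 := by
    rw [hds2def, List.length_eraseIdx, if_pos (by rw [hlen1] at hi2n ⊢; omega), hlen1]
    omega
  have hne2 : ds2 ≠ [] := by
    intro h
    have := congrArg List.length h
    rw [hlen2] at this
    simp at this
    omega
  obtain ⟨⟨hi30, hi3n⟩, -, -⟩ := pv_argmin_props _ hne2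
  set i3 := pvArgmin ds2 with hi3def
  have hc3 : (i3.toNat : Int) = i3 := Int.toNat_of_nonneg hi30
  -- penguin-list bounds and lengths
  have hplen1 : (penguins.eraseIdx i1.toNat).length = penguins.length - 1 := by
    rw [List.length_eraseIdx, if_pos hb1]
  have hplen2 : ((penguins.eraseIdx i1.toNat).eraseIdx i2.toNat).length = penguins.length - 2 := by
    rw [List.length_eraseIdx, if_pos (by omega), hplen1]
    omega
  -- unroll A's three rounds
  have hA : pvWhileA 3 ds penguins []
      = [PySem.List.pyGetD penguins i1 "",
         PySem.List.pyGetD (penguins.eraseIdx i1.toNat) i2 "",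
         PySem.List.pyGetD ((penguins.eraseIdx i1.toNat).eraseIdx i2.toNat) i3 ""] := by
    rw [show (3 : Nat) = 2 + 1 from rfl, pv_round 2 ds penguins [] hne hb1,
        show (2 : Nat) = 1 + 1 from rfl, pv_round 1 ds1 _ _ hne1 (by rw [hplen1]; omega),
        pv_round 0 ds2 _ _ hne2 (by rw [hplen2]; omega)]
    rfl
  -- B's sorted prefix
  have horder : PySem.List.sorted2 (PySem.List.pyRange 0 (ds.length : Int) 1)
      (fun k => PySem.List.pyGetD ds k 0) (fun k => k) false = pvSS ds := by
    rw [pv_sorted2_eq_sorted_lex]; rfl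
  have htake : (pvSS ds).take 3 = [i1, pvShift i1 i2, pvShift i1 (pvShift i2 i3)] := by
    rw [pv_SS_cons ds hne, pv_SS_cons ds1 hne1, pv_SS_cons ds2 hne2]
    simp only [List.map_cons, List.take_succ_cons, List.take_zero]
    rfl
  -- the three winner values coincide
  have hs23 : 0 ≤ pvShift i2 i3 ∧ pvShift i2 i3 < (penguins.length : Int) - 1 := by
    unfold pvShift; split_ifs <;> omega
  have e2 : PySem.List.pyGetD (penguins.eraseIdx i1.toNat) i2 ""
      = PySem.List.pyGetD penguins (pvShift i1 i2) "" :=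
    pv_pyGetD_eraseIdx penguins "" i1 i2 hi10 (by omega) hi20 (by omega)
  have e3 : PySem.List.pyGetD ((penguins.eraseIdx i1.toNat).eraseIdx i2.toNat) i3 ""
      = PySem.List.pyGetD penguins (pvShift i1 (pvShift i2 i3)) "" := by
    rw [pv_pyGetD_eraseIdx (penguins.eraseIdx i1.toNat) "" i2 i3 hi20
          (by rw [hplen1]; omega) hi30 (by omega),
        pv_pyGetD_eraseIdx penguins "" i1 (pvShift i2 i3) hi10 (by omega) hs23.1 hs23.2]
  -- assemble
  rw [calculate_winners, calculate_winners_alt, ← pv_parse_eq, ← hdsdef, horder,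
      PySem.List.slice_to _ (by norm_num : (0 : Int) ≤ 3),
      show Int.toNat 3 = 3 from rfl, hA, htake]
  simp only [List.map_cons, List.map_nil]
  rw [e2, e3]
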